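-- pv_equiv track=rewrite | github.com/igizm0/SimplePyScripts | DecodingPhoneNumberForCLI/DecodingPhoneNumberForCLI.py | decoding_phone_number
-- ===== SOURCE A (Python) =====
-- def decoding_phone_number(string):
--     string += " "
--     result = ""
--     last = ""
--     repeat = 1
--     symbol_before_grill = ""
--
--     for s in string:
--         if not last:
--             last = s
--             repeat = 1
--             continue
--
--         if s is "#" and last is not "#":  # Если текущий символ # и предыдущий число
--             symbol_before_grill = last  # Запомним символ перед #
--
--         if last is s:  # Если встретили повтор
--             repeat += 1
--         else:  # Если символ не такой же как предыдущий
--             if repeat > 1:  # Если символ имеет повторы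
--                 if last is "#" and symbol_before_grill:  # Если последним символов является # и ...
--                     result += symbol_before_grill  # Добавим число, перед #, но саму # добавлять не будем
--                     symbol_before_grill = ""
--                 else:
--                     result += last
--                 repeat = 1
--
--         last = s
--
--     return result
-- ===== SOURCE B (Python) =====
-- def decoding_phone_number(string):
--     # Run-length-encode the input once, drop a trailing run of spaces
--     # (A's sentinel space merges into it and the final run is never flushed),
--     # then emit one char per run of length > 1, using the previous run's
--     # char for a '#' run (or '#' itself when the run starts the string).
--     runs = []
--     for ch in string:
--         if runs and runs[-1][0] == ch:
--             runs[-1][1] += 1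
--         else:
--             runs.append([ch, 1])
--     if runs and runs[-1][0] == ' ':
--         runs.pop()
--     out = []
--     prev = None
--     for ch, n in runs:
--         if n > 1:
--             out.append((prev if prev is not None else '#') if ch == '#' else ch)
--         prev = ch
--     return ''.join(out)
-- ===== Notes on version B (the rewrite author's own statement) =====
-- stated objective: alternative
-- what changed: A's single-pass four-variable state machine (last/repeat/symbol_before_grill with lazy flushing at run boundaries) is replaced by a two-phase decomposition: build the run-length encoding once, drop a trailing space run (which A's appended sentinel space merges into and never flushes), then map each run of length > 1 to one output char, using the previous run's char for '#' runs.
import Mathlib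
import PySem

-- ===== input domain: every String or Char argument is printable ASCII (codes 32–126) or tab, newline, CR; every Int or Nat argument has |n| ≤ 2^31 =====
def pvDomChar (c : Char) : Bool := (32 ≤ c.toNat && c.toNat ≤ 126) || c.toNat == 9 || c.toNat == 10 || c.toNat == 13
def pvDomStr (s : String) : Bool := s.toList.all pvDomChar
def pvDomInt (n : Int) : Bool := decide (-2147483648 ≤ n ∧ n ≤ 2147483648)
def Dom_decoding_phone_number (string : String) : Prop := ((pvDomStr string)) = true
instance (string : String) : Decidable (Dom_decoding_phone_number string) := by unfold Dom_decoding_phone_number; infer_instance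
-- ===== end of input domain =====

-- B re-decomposes A's one-pass state machine as: run-length-encode once, then map runs to output
-- (objective: simpler/alternative decomposition, same cost); return values proved equal on Dom.

-- ===== PORT A =====
-- A's loop state: (result, last, repeat, symbol_before_grill); Python's `last`/`symbol_before_grill`
-- are "" or a single char, ported as Option Char (none = ""); `is` on single ASCII chars is `==`.
def pvStepA (st : List Char × Option Char × Nat × Option Char) (s : Char) :
    List Char × Option Char × Nat × Option Char :=
  match st with
  | (res, none, _, sbg) => (res, some s, 1, sbg)          -- if not last: last = s; repeat = 1; continue
  | (res, some last, rep, sbg0) =>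
    let sbg := if s = '#' ∧ last ≠ '#' then some last else sbg0
    if last = s then (res, some s, rep + 1, sbg)          -- repeat += 1
    else if rep > 1 then
      if last = '#' ∧ sbg.isSome then
        (res ++ [sbg.getD '#'], some s, 1, none)          -- result += symbol_before_grill (sbg is some here, getD exact)
      else (res ++ [last], some s, 1, sbg)                -- result += last
    else (res, some s, 1, sbg)

def decoding_phone_number (string : String) : String :=
  -- string += " "
  String.mk (List.foldl pvStepA ([], none, 1, none) (string.toList ++ [' '])).1

-- ===== PORT B =====
-- runs[-1] of B's list is the head here (built in reverse, reversed at the end).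
def pvStepB (rs : List (Char × Nat)) (ch : Char) : List (Char × Nat) :=
  match rs with
  | (c, n) :: rest => if c = ch then (c, n + 1) :: rest else (ch, 1) :: (c, n) :: rest
  | [] => [(ch, 1)]

-- if runs and runs[-1][0] == ' ': runs.pop()
def pvPop (rs : List (Char × Nat)) : List (Char × Nat) :=
  match rs.getLast? with
  | some (c, _) => if c = ' ' then rs.dropLast else rs
  | none => rs

-- one output char per run of length > 1; prev = previous run's char
def pvEmit (prev : Option Char) (r : Char × Nat) : List Char :=
  if r.2 > 1 then [if r.1 = '#' then prev.getD '#' else r.1] else []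

def pvFlush (prev : Option Char) : List (Char × Nat) → List Char
  | [] => []
  | r :: rest => pvEmit prev r ++ pvFlush (some r.1) rest

def decoding_phone_number_alt (string : String) : String :=
  String.mk (pvFlush none (pvPop (List.foldl pvStepB [] string.toList).reverse))

-- ===== PRECONDITION & SPEC =====
def Spec_decoding_phone_number (string : String) (out : String) : Prop := out = decoding_phone_number_alt string
instance (string : String) (out : String) : Decidable (Spec_decoding_phone_number string out) := by unfold Spec_decoding_phone_number; infer_instance

-- ===== CLAIM (what is proved, stated in full; the proofs are below) =====
def Claim_equal_decoding_phone_number : Prop := ∀ (string : String), Dom_decoding_phone_number string → Spec_decoding_phone_number string (decoding_phone_number string)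

-- ===== LEMMAS AND PROOFS =====

-- canonical front-recursive run-length encoding: pvRunsC c n l = runs of (replicate n c ++ l)
def pvRunsC (c : Char) (n : Nat) : List Char → List (Char × Nat)
  | [] => [(c, n)]
  | d :: rest => if c = d then pvRunsC c (n + 1) rest else (c, n) :: pvRunsC d 1 rest

theorem pvRunsC_ne_nil (l : List Char) (c : Char) (n : Nat) : pvRunsC c n l ≠ [] := by
  induction l generalizing c n with
  | nil => simp [pvRunsC]
  | cons d rest ih => by_cases h : c = d <;> simp [pvRunsC, h, ih]

theorem foldB_eq_runsC (l : List Char) (acc : List (Char × Nat)) (c : Char) (n : Nat) :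
    List.foldl pvStepB ((c, n) :: acc) l = (pvRunsC c n l).reverse ++ acc := by
  induction l generalizing acc c n with
  | nil => simp [pvRunsC]
  | cons d rest ih =>
    by_cases h : c = d
    · simp [List.foldl, pvStepB, h, pvRunsC, ih]
    · simp [List.foldl, pvStepB, h, pvRunsC, ih]

-- appending one char to the encoded list
def pvBot (x : Char) : List (Char × Nat) → List (Char × Nat)
  | [] => [(x, 1)]
  | [(c, n)] => if c = x then [(c, n + 1)] else [(c, n), (x, 1)]
  | r :: s :: rest => r :: pvBot x (s :: rest)

theorem pvBot_cons (x : Char) (r : Char × Nat) (R : List (Char × Nat)) (h : R ≠ []) :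
    pvBot x (r :: R) = r :: pvBot x R := by
  match R with
  | [] => exact absurd rfl h
  | s :: rest => rfl

theorem runsC_append (x : Char) (l : List Char) (c : Char) (n : Nat) :
    pvRunsC c n (l ++ [x]) = pvBot x (pvRunsC c n l) := by
  induction l generalizing c n with
  | nil => by_cases h : c = x <;> simp [pvRunsC, pvBot, h]
  | cons d rest ih =>
    by_cases h : c = d
    · simp [pvRunsC, h, ih]
    · simp only [List.cons_append, pvRunsC, if_neg h, ih]
      rw [pvBot_cons x _ _ (pvRunsC_ne_nil _ _ _)]

-- expansion back into chars
def pvExpand (rs : List (Char × Nat)) : List Char := rs.flatMap fun r => List.replicate r.2 r.1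

theorem expand_runsC (l : List Char) (c : Char) (n : Nat) :
    pvExpand (pvRunsC c n l) = List.replicate n c ++ l := by
  induction l generalizing c n with
  | nil => simp [pvRunsC, pvExpand]
  | cons d rest ih =>
    by_cases h : c = d
    · subst h
      simp only [pvRunsC, if_true]
      rw [ih, List.replicate_succ']
      simp
    · simp only [pvRunsC, if_neg h, pvExpand, List.flatMap_cons]
      have hrw : (pvRunsC d 1 rest).flatMap (fun r => List.replicate r.2 r.1) = pvExpand (pvRunsC d 1 rest) := rfl
      rw [hrw, ih]
      simp

-- well-formedness: lengths ≥ 1, adjacent run chars distinct, first char ≠ p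
def pvRunsOk (p : Option Char) : List (Char × Nat) → Prop
  | [] => True
  | (c, n) :: rest => p ≠ some c ∧ 1 ≤ n ∧ pvRunsOk (some c) rest

theorem runsC_ok (l : List Char) (c : Char) (n : Nat) (p : Option Char)
    (hn : 1 ≤ n) (hp : p ≠ some c) : pvRunsOk p (pvRunsC c n l) := by
  induction l generalizing c n p with
  | nil =>
    simp only [pvRunsC, pvRunsOk]
    exact ⟨hp, hn, trivial⟩
  | cons d rest ih =>
    by_cases h : c = d
    · simpa [pvRunsC, h] using ih c (n + 1) p (by omega) hp
    · simp only [pvRunsC, if_neg h, pvRunsOk]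
      exact ⟨hp, hn, ih d 1 (some c) le_rfl (by simp [h])⟩

-- flush all runs but the last (A never flushes the final run)
def pvFbl (prev : Option Char) : List (Char × Nat) → List Char
  | [] => []
  | [_] => []
  | r :: s :: rest => pvEmit prev r ++ pvFbl (some r.1) (s :: rest)

theorem pvBot_ne_nil (x : Char) (R : List (Char × Nat)) : pvBot x R ≠ [] := by
  match R with
  | [] => simp [pvBot]
  | [(c, n)] => by_cases h : c = x <;> simp [pvBot, h]
  | r :: s :: rest => simp [pvBot]

theorem fbl_bot_eq_flush_pop (R : List (Char × Nat)) (prev : Option Char) (h : R ≠ []) :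
    pvFbl prev (pvBot ' ' R) = pvFlush prev (pvPop R) := by
  induction R generalizing prev with
  | nil => exact absurd rfl h
  | cons r rest ih =>
    match rest with
    | [] =>
      obtain ⟨c, n⟩ := r
      by_cases hc : c = ' ' <;>
        simp [pvBot, pvPop, hc, pvFbl, pvFlush, pvEmit]
    | s :: rest' =>
      have hne : (s :: rest') ≠ [] := by simp
      have hpop : pvPop (r :: s :: rest') = r :: pvPop (s :: rest') := by
        have hs : (s :: rest').getLast?.isSome := by
          rw [List.getLast?_isSome]; simp
        obtain ⟨⟨c, m⟩, hq⟩ := Option.isSome_iff_exists.mp hs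
        unfold pvPop
        rw [List.getLast?_cons_cons, hq]
        by_cases hc : c = ' '
        · simp [hc, List.dropLast_cons_of_ne_nil (l := s :: rest') (by simp)]
        · simp [hc]
      rw [pvBot_cons ' ' r _ hne, hpop]
      obtain ⟨t, ts, ht⟩ := List.exists_cons_of_ne_nil (pvBot_ne_nil ' ' (s :: rest'))
      rw [ht]
      show pvEmit prev r ++ pvFbl (some r.1) (t :: ts) = _
      rw [← ht, ih (some r.1) hne]
      rfl

-- A's fold over one run's repeats
theorem foldA_repeat (k : Nat) (res : List Char) (c : Char) (n : Nat) (sbg : Option Char) :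
    List.foldl pvStepA (res, some c, n, sbg) (List.replicate k c) = (res, some c, n + k, sbg) := by
  induction k generalizing n with
  | zero => simp
  | succ k ih =>
    rw [List.replicate_succ, List.foldl_cons]
    have hstep : pvStepA (res, some c, n, sbg) c = (res, some c, n + 1, sbg) := by
      simp [pvStepA]
    rw [hstep, ih]
    have h1 : n + 1 + k = n + (k + 1) := by omega
    rw [h1]

-- A's fold across a whole run (first char transition + repeats), c ≠ d
theorem foldA_run (res : List Char) (c d : Char) (n m : Nat) (sbg prev : Option Char)
    (hcd : c ≠ d) (hm : 1 ≤ m) (hsbg : c = '#' → sbg = prev) :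
    List.foldl pvStepA (res, some c, n, sbg) (List.replicate m d) =
      (res ++ pvEmit prev (c, n), some d, m,
        if d = '#' then some c
        else if n > 1 ∧ c = '#' then none else sbg) := by
  obtain ⟨m', rfl⟩ : ∃ m', m = m' + 1 := ⟨m - 1, by omega⟩
  rw [List.replicate_succ, List.foldl_cons]
  have hdc : ¬ (c = d) := hcd
  by_cases hd : d = '#'
  · -- first char of new run is '#': sbg := some c; c ≠ '#'
    have hc : ¬ (c = '#') := fun h => hcd (h.trans hd.symm)
    by_cases hn : n > 1
    · have hstep : pvStepA (res, some c, n, sbg) d =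
          (res ++ [c], some d, 1, some c) := by
        simp [pvStepA, hd, hc, hdc, hn]
      rw [hstep, foldA_repeat]
      simp [pvEmit, hn, hc, hd]
      omega
    · have hstep : pvStepA (res, some c, n, sbg) d = (res, some d, 1, some c) := by
        simp [pvStepA, hd, hc, hdc, hn]
      rw [hstep, foldA_repeat]
      simp [pvEmit, hn, hd, hc]
      omega
  · -- new run char not '#': sbg unchanged at transition
    by_cases hn : n > 1
    · by_cases hc : c = '#'
      · -- flush a '#' run: sbg = prev
        subst hc
        rw [hsbg rfl]
        match prev with
        | some b =>
          have hstep : pvStepA (res, some '#', n, some b) d =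
              (res ++ [b], some d, 1, none) := by
            simp [pvStepA, hd, hdc, hn]
          rw [hstep, foldA_repeat]
          simp [pvEmit, hn, hd, hdc]
          omega
        | none =>
          have hstep : pvStepA (res, some '#', n, none) d =
              (res ++ ['#'], some d, 1, none) := by
            simp [pvStepA, hd, hdc, hn]
          rw [hstep, foldA_repeat]
          simp [pvEmit, hn, hd, hdc]
          omega
      · have hstep : pvStepA (res, some c, n, sbg) d =
            (res ++ [c], some d, 1, sbg) := by
          simp [pvStepA, hd, hc, hdc, hn]
        rw [hstep, foldA_repeat]
        simp [pvEmit, hn, hd, hc]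
        omega
    · have hstep : pvStepA (res, some c, n, sbg) d = (res, some d, 1, sbg) := by
        simp [pvStepA, hd, hdc, hn]
      rw [hstep, foldA_repeat]
      simp [pvEmit, hn, hd]
      omega

-- the main invariant: A across the remaining runs = flush-all-but-last
theorem foldA_runs (rs : List (Char × Nat)) (c : Char) (n : Nat)
    (sbg prev : Option Char) (res : List Char)
    (hok : pvRunsOk (some c) rs) (hsbg : c = '#' → sbg = prev) :
    (List.foldl pvStepA (res, some c, n, sbg) (pvExpand rs)).1 =
      res ++ pvFbl prev ((c, n) :: rs) := by
  induction rs generalizing c n sbg prev res with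
  | nil => simp [pvExpand, pvFbl]
  | cons r rest ih =>
    obtain ⟨d, m⟩ := r
    obtain ⟨hne, hm, hok'⟩ := hok
    have hcd : c ≠ d := fun h => hne (by rw [h])
    have hexp : pvExpand ((d, m) :: rest) = List.replicate m d ++ pvExpand rest := by
      simp [pvExpand]
    rw [hexp, List.foldl_append, foldA_run res c d n m sbg prev hcd hm hsbg]
    have hsbg' : d = '#' → (if d = '#' then some c
        else if n > 1 ∧ c = '#' then none else sbg) = some c := by
      intro h; simp [h]
    rw [ih d m _ (some c) _ hok' hsbg']
    simp [pvFbl]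

-- A's whole fold from the initial (last = none) state
theorem foldA_full (rs : List (Char × Nat)) (res : List Char) (r0 : Nat)
    (hok : pvRunsOk none rs) :
    (List.foldl pvStepA (res, none, r0, none) (pvExpand rs)).1 = res ++ pvFbl none rs := by
  match rs with
  | [] => simp [pvExpand, pvFbl]
  | (c, n) :: rest =>
    obtain ⟨-, hn, hok'⟩ := hok
    obtain ⟨n', rfl⟩ : ∃ n', n = n' + 1 := ⟨n - 1, by omega⟩
    have hexp : pvExpand ((c, n' + 1) :: rest) =
        c :: (List.replicate n' c ++ pvExpand rest) := by
      simp [pvExpand, List.replicate_succ]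
    rw [hexp, List.foldl_cons]
    have hstep : pvStepA (res, none, r0, none) c = (res, some c, 1, none) := by
      simp [pvStepA]
    rw [hstep, List.foldl_append, foldA_repeat, Nat.add_comm 1 n']
    exact foldA_runs rest c (n' + 1) none none res hok' (fun _ => rfl)

-- ===== VERDICT (by name: the statement is the Claim_ definition above) =====
theorem decoding_phone_number_spec : Claim_equal_decoding_phone_number := by
  intro s _
  unfold Spec_decoding_phone_number decoding_phone_number decoding_phone_number_alt
  match hl : s.toList with
  | [] => simp [pvStepA, pvPop, pvFlush, List.foldl]
  | c :: l' =>
    -- B's runs = pvRunsC c 1 l'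
    have hB : (List.foldl pvStepB [] (c :: l')).reverse = pvRunsC c 1 l' := by
      rw [List.foldl_cons]
      show (List.foldl pvStepB ((c, 1) :: []) l').reverse = _
      rw [foldB_eq_runsC]
      simp
    -- A's input chars = expansion of the runs of (c :: l' ++ [' '])
    have hA : (c :: l') ++ [' '] = pvExpand (pvRunsC c 1 (l' ++ [' '])) := by
      rw [expand_runsC]; simp
    rw [hB, hA, foldA_full _ _ _ (runsC_ok _ c 1 none le_rfl (by simp)),
        runsC_append, fbl_bot_eq_flush_pop _ none (pvRunsC_ne_nil _ _ _)]
    simp
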